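-- pv_equiv track=rewrite | github.com/YidanChen524/msa-l-stars | helpers.py | generate_all_l_stars
-- ===== SOURCE A (Python) =====
-- from itertools import combinations
--
-- def generate_all_l_stars(k, l):
--     """given the length of the sequences k and size of each clique l, return all possible l-stars"""
--     l_stars = []
--
--     def _next_clique(center, nodes):
--         for comb in combinations(nodes[1:], l-2):
--             clique = (center, nodes[0],) + comb
--             remain = [i for i in nodes if i not in clique]
--             yield clique, remain
--
--     def _backtrack(nodes, center, cliques):
--         if not nodes:
--             l_stars.append(cliques.copy())
--         else:
--             for clique, remain in _next_clique(center, nodes):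
--                 cliques.append(clique)
--                 _backtrack(remain, center, cliques)
--                 cliques.pop()
--
--     for c in range(k):
--         _backtrack([i for i in range(k) if i != c], c, [])
--
--     return l_stars
-- ===== SOURCE B (Python) =====
-- from itertools import combinations
--
-- def generate_all_l_stars(k, l):
--     """given the length of the sequences k and size of each clique l, return all possible l-stars"""
--     result = []
--     for c in range(k):
--         # breadth-first worklist: each state is (remaining nodes, partition built so far);
--         # every expansion removes exactly l-1 nodes, so all states in a level share the
--         # same remaining-node count and level order equals the depth-first order.
--         states = [([i for i in range(k) if i != c], [])]
--         while states and states[0][0]: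
--             new_states = []
--             for nodes, part in states:
--                 head, rest = nodes[0], nodes[1:]
--                 for comb in combinations(rest, l - 2):
--                     clique = (c, head) + comb
--                     remain = [i for i in nodes if i not in clique]
--                     new_states.append((remain, part + [clique]))
--             states = new_states
--         result.extend(part for _, part in states)
--     return result
-- ===== Notes on version B (the rewrite author's own statement) =====
-- stated objective: alternative
-- what changed: Replaces A's recursive backtracking with a shared mutated cliques list (append/recurse/pop into an outer l_stars) by an iterative breadth-first worklist of (remaining-nodes, partition) states expanded level by level; since every expansion removes exactly l-1 nodes, level order equals A's depth-first order.
import Mathlib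
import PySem

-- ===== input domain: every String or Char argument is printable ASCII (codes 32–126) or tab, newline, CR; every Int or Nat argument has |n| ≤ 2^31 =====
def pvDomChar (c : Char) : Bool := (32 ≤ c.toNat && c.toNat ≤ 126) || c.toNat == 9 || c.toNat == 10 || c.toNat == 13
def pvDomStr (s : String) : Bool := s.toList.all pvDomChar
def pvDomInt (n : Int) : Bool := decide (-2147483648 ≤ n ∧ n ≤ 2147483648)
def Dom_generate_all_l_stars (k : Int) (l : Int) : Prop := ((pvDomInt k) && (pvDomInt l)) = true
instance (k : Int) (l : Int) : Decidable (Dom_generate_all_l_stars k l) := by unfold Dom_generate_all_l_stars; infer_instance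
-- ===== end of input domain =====

-- B replaces A's recursive backtracking (shared mutated `cliques` accumulator with append/pop)
-- by an iterative breadth-first worklist of (remaining-nodes, partition) states (objective: alternative).

-- itertools.combinations(xs, r): r-subsequences in lexicographic index order (used by both Pythons)
-- (like itertools, yields nothing at once when r exceeds len(xs))
def pyCombinations (xs : List Int) (r : Nat) : List (List Int) :=
  if xs.length < r then []
  else match r, xs with
  | 0, _ => [[]]
  | _ + 1, [] => []
  | r + 1, x :: rest => (pyCombinations rest r).map (fun c => x :: c) ++ pyCombinations rest (r + 1)
  termination_by xs.length
  decreasing_by all_goals simp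

-- ===== PORT A =====
-- A's _backtrack: mutated `cliques` / append-only `l_stars` modelled as the returned list of appended
-- partitions; the generator _next_clique is inlined into the loop it feeds.  `fuel` only makes the
-- recursion total (each recursive call strictly shrinks `nodes`; top level supplies fuel ≥ length).
def pvBacktrackA (l : Int) (fuel : Nat) (nodes : List Int) (center : Int)
    (cliques : List (List Int)) : List (List (List Int)) :=
  match fuel, nodes with
  | _, [] => [cliques]
  | 0, _ :: _ => []
  | fuel + 1, n0 :: rest =>
    (pyCombinations rest (l - 2).toNat).foldl
      (fun acc comb =>
        let clique := center :: n0 :: comb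
        let remain := (n0 :: rest).filter (fun i => !clique.contains i)
        acc ++ pvBacktrackA l fuel remain center (cliques ++ [clique])) []

def generate_all_l_stars (k : Int) (l : Int) : List (List (List Int)) :=
  (PySem.List.pyRange 0 k 1).foldl
    (fun acc c =>
      acc ++ pvBacktrackA l k.toNat ((PySem.List.pyRange 0 k 1).filter (fun i => i != c)) c [])
    []

-- ===== PORT B =====
-- one pass of B's inner `for nodes, part in states` loop, building `new_states`
-- (a state with empty `nodes` is never expanded by the Python; the [] branch is unreachable filler)
def pvStepB (l : Int) (center : Int) (states : List (List Int × List (List Int))) :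
    List (List Int × List (List Int)) :=
  states.flatMap (fun s =>
    match s.1 with
    | [] => []
    | n0 :: rest =>
      (pyCombinations rest (l - 2).toNat).map (fun comb =>
        let clique := center :: n0 :: comb
        ((n0 :: rest).filter (fun i => !clique.contains i), s.2 ++ [clique])))

-- B's `while states and states[0][0]` loop; fuel only bounds the iteration count
-- (each pass strictly shrinks every state's node list; top level supplies fuel ≥ k)
def pvLoopB (l : Int) (center : Int) (fuel : Nat)
    (states : List (List Int × List (List Int))) : List (List (List Int)) :=
  match states with
  | [] => []
  | (nodes, _) :: _ =>
    if nodes.isEmpty then states.map Prod.snd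
    else match fuel with
      | 0 => []
      | f + 1 => pvLoopB l center f (pvStepB l center states)

def generate_all_l_stars_alt (k : Int) (l : Int) : List (List (List Int)) :=
  (PySem.List.pyRange 0 k 1).flatMap
    (fun c => pvLoopB l c k.toNat [((PySem.List.pyRange 0 k 1).filter (fun i => i != c), [])])

-- ===== PRECONDITION & SPEC =====
-- Pre_ excludes exactly the inputs where both Pythons raise ValueError:
-- k ≥ 2 and l < 2 make combinations(nodes[1:], l-2) receive a negative r.
def Pre_generate_all_l_stars (k : Int) (l : Int) : Prop := 2 ≤ l ∨ k ≤ 1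
instance (k : Int) (l : Int) : Decidable (Pre_generate_all_l_stars k l) := by
  unfold Pre_generate_all_l_stars; infer_instance

def pvWitness_generate_all_l_stars : Int × Int := (3, 3)

def Spec_generate_all_l_stars (k : Int) (l : Int) (out : List (List (List Int))) : Prop :=
  out = generate_all_l_stars_alt k l
instance (k : Int) (l : Int) (out : List (List (List Int))) : Decidable (Spec_generate_all_l_stars k l out) := by
  unfold Spec_generate_all_l_stars; infer_instance

-- ===== CLAIM (what is proved, stated in full; the proofs are below) =====
def Claim_equal_generate_all_l_stars : Prop := ∀ (k : Int) (l : Int), Dom_generate_all_l_stars k l → Pre_generate_all_l_stars k l → Spec_generate_all_l_stars k l (generate_all_l_stars k l)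

-- ===== LEMMAS AND PROOFS =====

-- every member of pyCombinations xs r is a length-r subsequence of xs
theorem mem_pyCombinations {r : Nat} {xs c : List Int} (h : c ∈ pyCombinations xs r) :
    c.Sublist xs ∧ c.length = r := by
  induction xs generalizing r c with
  | nil =>
    rw [pyCombinations.eq_def] at h
    match r with
    | 0 => simp at h; simp [h]
    | _ + 1 => simp at h
  | cons x rest ih =>
    rw [pyCombinations.eq_def] at h
    split at h
    · simp at h
    · match r with
      | 0 => simp at h; simp [h]
      | s + 1 =>
        simp only [List.mem_append, List.mem_map] at h
        rcases h with ⟨c', hc', rfl⟩ | h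
        · obtain ⟨h1, h2⟩ := ih hc'
          exact ⟨List.Sublist.cons₂ x h1, by simp [h2]⟩
        · obtain ⟨h1, h2⟩ := ih h
          exact ⟨h1.cons x, h2⟩

-- removing the elements of a subsequence from a duplicate-free list drops exactly its length
theorem length_filter_not_mem {s t : List Int} (hs : s.Sublist t) (ht : t.Nodup) :
    (t.filter (fun i => !s.contains i)).length = t.length - s.length := by
  induction hs with
  | slnil => simp
  | @cons s t a h ih =>
    have hat : a ∉ t := (List.nodup_cons.mp ht).1
    have has : a ∉ s := fun hm => hat (h.subset hm)
    have hlen : s.length ≤ t.length := h.length_le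
    rw [List.filter_cons_of_pos (by simp [has]), List.length_cons,
      ih (List.nodup_cons.mp ht).2]
    simp only [List.length_cons]
    omega
  | @cons₂ s t a h ih =>
    have hat : a ∉ t := (List.nodup_cons.mp ht).1
    rw [List.filter_cons_of_neg (by simp)]
    have hcongr : t.filter (fun i => !(a :: s).contains i) = t.filter (fun i => !s.contains i) := by
      apply List.filter_congr
      intro i hi
      have : i ≠ a := fun hia => hat (hia ▸ hi)
      simp [this]
    rw [hcongr, ih (List.nodup_cons.mp ht).2]
    simp

-- the filter a step performs, computed in closed form on its length
theorem remain_length {center n0 : Int} {rest comb : List Int}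
    (hnd : (n0 :: rest).Nodup) (hc : center ∉ n0 :: rest) (hcomb : comb.Sublist rest) :
    ((n0 :: rest).filter (fun i => !(center :: n0 :: comb).contains i)).length
      = rest.length - comb.length := by
  have hn0rest : n0 ∉ rest := (List.nodup_cons.mp hnd).1
  rw [List.filter_cons_of_neg (by simp)]
  have hcongr : rest.filter (fun i => !(center :: n0 :: comb).contains i)
      = rest.filter (fun i => !comb.contains i) := by
    apply List.filter_congr
    intro i hi
    have h1 : i ≠ center := fun h => hc (h ▸ List.mem_cons_of_mem _ hi)
    have h2 : i ≠ n0 := fun h => hn0rest (h ▸ hi)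
    simp [h1, h2]
  rw [hcongr, length_filter_not_mem hcomb (List.nodup_cons.mp hnd).2]

-- unrolling A's backtracking once is one B step on the corresponding single state
theorem backtrack_unroll (l center : Int) (f : Nat) (n0 : Int) (rest : List Int)
    (part : List (List Int)) :
    pvBacktrackA l (f + 1) (n0 :: rest) center part
      = ((pyCombinations rest (l - 2).toNat).map (fun comb =>
            let clique := center :: n0 :: comb
            ((n0 :: rest).filter (fun i => !clique.contains i), part ++ [clique]))).flatMap
          (fun s => pvBacktrackA l f s.1 center s.2) := by
  rw [pvBacktrackA, PySem.List.foldl_append_eq_flatMap, List.nil_append, List.flatMap_map]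

theorem backtrack_nil (l center : Int) (fuel : Nat) (part : List (List Int)) :
    pvBacktrackA l fuel [] center part = [part] := by
  cases fuel <;> rfl

-- on states whose node lists are all exhausted, A's backtracking just reads off the partitions
theorem flatMap_backtrack_empty (l center : Int) (fuel : Nat)
    (states : List (List Int × List (List Int))) (h : ∀ s ∈ states, s.1 = []) :
    states.flatMap (fun s => pvBacktrackA l fuel s.1 center s.2) = states.map Prod.snd := by
  induction states with
  | nil => simp
  | cons a t ih =>
    rw [List.flatMap_cons, ih (fun s hs => h s (List.mem_cons_of_mem _ hs)),
      h a List.mem_cons_self, backtrack_nil]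
    rfl

-- one worklist pass preserves the invariant, shrinking every state's node count uniformly
theorem step_inv (l center : Int) (n : Nat) (states : List (List Int × List (List Int)))
    (hinv : ∀ s ∈ states, s.1.length = n ∧ s.1.Nodup ∧ center ∉ s.1) :
    ∀ s' ∈ pvStepB l center states,
      s'.1.length = n - 1 - (l - 2).toNat ∧ s'.1.Nodup ∧ center ∉ s'.1 := by
  intro s' hs'
  rw [pvStepB, List.mem_flatMap] at hs'
  obtain ⟨s, hs, hmem⟩ := hs'
  obtain ⟨hlen, hnd, hcen⟩ := hinv s hs
  match hnodes : s.1 with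
  | [] => rw [hnodes] at hmem; simp at hmem
  | n0 :: rest =>
    rw [hnodes] at hmem
    simp only [List.mem_map] at hmem
    obtain ⟨comb, hcomb, rfl⟩ := hmem
    obtain ⟨hsub, hclen⟩ := mem_pyCombinations hcomb
    rw [hnodes] at hlen hnd hcen
    refine ⟨?_, ?_, ?_⟩ <;> dsimp only
    · rw [remain_length hnd hcen hsub, hclen]
      simp at hlen
      omega
    · exact hnd.filter _
    · intro hm
      exact hcen (List.mem_of_mem_filter hm)

-- B's worklist loop computes the concatenation of A's backtracking over its states,
-- provided all states carry the same number of remaining nodes (duplicate-free, center-free)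
theorem loop_eq_backtrack (l center : Int) :
    ∀ (fuel n : Nat) (states : List (List Int × List (List Int))),
      (∀ s ∈ states, s.1.length = n ∧ s.1.Nodup ∧ center ∉ s.1) → n ≤ fuel →
      pvLoopB l center fuel states
        = states.flatMap (fun s => pvBacktrackA l fuel s.1 center s.2) := by
  intro fuel
  induction fuel with
  | zero =>
    intro n states hinv hn
    have hnil : ∀ s ∈ states, s.1 = [] := by
      intro s hs
      have := (hinv s hs).1
      exact List.eq_nil_of_length_eq_zero (by omega)
    match states with
    | [] => simp [pvLoopB]
    | (nodes, part) :: tail =>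
      have h0 : nodes = [] := hnil _ List.mem_cons_self
      rw [pvLoopB, flatMap_backtrack_empty l center 0 _ hnil]
      simp [h0]
  | succ f ih =>
    intro n states hinv hn
    match states with
    | [] => simp [pvLoopB]
    | (nodes, part) :: tail =>
      match nodes with
      | [] =>
        have h0 : n = 0 := by
          have := (hinv _ List.mem_cons_self).1
          simpa using this.symm
        have hnil : ∀ s ∈ (([], part) :: tail :
            List (List Int × List (List Int))), s.1 = [] := by
          intro s hs
          have := (hinv s hs).1
          exact List.eq_nil_of_length_eq_zero (by omega)
        rw [pvLoopB, flatMap_backtrack_empty l center (f + 1) _ hnil]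
        simp
      | m :: ms =>
        have hpos : 0 < n := by
          have := (hinv _ List.mem_cons_self).1
          simp at this
          omega
        rw [pvLoopB]
        simp only [List.isEmpty_cons]
        rw [ih (n - 1 - (l - 2).toNat) _ (step_inv l center n _ hinv) (by omega)]
        rw [pvStepB, List.flatMap_assoc]
        apply List.flatMap_congr
        intro s hs
        have hlen := (hinv s hs).1
        match hnodes : s.1 with
        | [] => rw [hnodes] at hlen; simp at hlen; omega
        | n0 :: rest =>
          obtain ⟨snodes, spart⟩ := s
          simp only at hnodes
          subst hnodes
          rw [backtrack_unroll]

-- ===== VERDICT (by name: the statement is the Claim_ definition above) =====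
theorem generate_all_l_stars_spec : Claim_equal_generate_all_l_stars := by
  intro k l _ _
  unfold Spec_generate_all_l_stars generate_all_l_stars generate_all_l_stars_alt
  rw [PySem.List.foldl_append_eq_flatMap, List.nil_append]
  apply List.flatMap_congr
  intro c hc
  set nodes := (PySem.List.pyRange 0 k 1).filter (fun i => i != c) with hnodes
  have hinv : ∀ s ∈ ([(nodes, ([] : List (List Int)))] :
      List (List Int × List (List Int))),
      s.1.length = nodes.length ∧ s.1.Nodup ∧ c ∉ s.1 := by
    intro s hs
    simp only [List.mem_singleton] at hs
    subst hs
    refine ⟨rfl, (PySem.List.nodup_pyRange_one 0 k).filter _, ?_⟩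
    intro hm
    rw [hnodes, List.mem_filter] at hm
    simp at hm
  have hle : nodes.length ≤ k.toNat := by
    calc nodes.length ≤ (PySem.List.pyRange 0 k 1).length := List.length_filter_le _ _
      _ = k.toNat := by simp [PySem.List.length_pyRange_one]
  rw [loop_eq_backtrack l c k.toNat nodes.length _ hinv hle]
  simp
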